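-- pv_equiv track=rewrite | github.com/spacetelescope/crds | crds/selectors.py | different_match_weight
-- ===== SOURCE A (Python) =====
-- def different_match_weight(subkey, superkey):
--     """The criteria for "ambiguous matches" are:
--
--     1. Superkey must be a match superset of subkey,  i.e. it matches any
--     time subkey does.
--     2. The match weights of superkey and subkey must be the same for an
--     ambiguity to exist. Where one key has the value N/A and the other
--     does not, the weights of their matches diverge.   Unequally weighted
--     matches aren't merged and hence aren't considered an ambiguity.
--     """
--     super_count = sub_count = len(subkey)
--     for i in range(sub_count):
--         if subkey[i] == "N/A" and superkey[i] != "N/A":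
--             sub_count -= 1
--         elif superkey[i] == "N/A" and subkey[i] != "N/A":
--             super_count -= 1
--     return sub_count != super_count
-- ===== SOURCE B (Python) =====
-- def different_match_weight(subkey, superkey):
--     """Same result as A: the interleaved double-decrement loop collapses to
--     comparing the two independent N/A tallies (positions where both are N/A
--     cancel on both sides)."""
--     na_sub = subkey.count("N/A")
--     na_super = sum(1 for i in range(len(subkey)) if superkey[i] == "N/A")
--     return na_sub != na_super
-- ===== Notes on version B (the rewrite author's own statement) =====
-- stated objective: simpler
-- what changed: Replaces A's single loop maintaining two interacting decremented counters with a direct comparison of two independent N/A tallies (subkey.count plus one index sum over the first len(subkey) positions of superkey), since positions where both keys are N/A cancel.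
import Mathlib
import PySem

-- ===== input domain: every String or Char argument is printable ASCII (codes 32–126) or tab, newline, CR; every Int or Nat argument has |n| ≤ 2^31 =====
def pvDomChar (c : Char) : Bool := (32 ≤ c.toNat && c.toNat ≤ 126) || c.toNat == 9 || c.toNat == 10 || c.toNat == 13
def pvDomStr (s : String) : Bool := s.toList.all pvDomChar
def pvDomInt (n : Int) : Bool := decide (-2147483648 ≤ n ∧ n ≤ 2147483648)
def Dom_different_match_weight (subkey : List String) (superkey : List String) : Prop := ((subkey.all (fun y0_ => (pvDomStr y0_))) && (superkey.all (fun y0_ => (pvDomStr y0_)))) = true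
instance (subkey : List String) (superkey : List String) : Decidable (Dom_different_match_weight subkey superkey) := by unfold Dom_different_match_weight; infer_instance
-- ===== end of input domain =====

-- B replaces A's interleaved two-counter loop by comparing two independent N/A tallies (simpler decomposition, same O(n) cost).


-- ===== PORT A =====
-- literal transliteration of A: one loop over range(len(subkey)) carrying (sub_count, super_count)
def different_match_weight (subkey : List String) (superkey : List String) : Bool :=
  let n : Int := subkey.length
  let st := (PySem.List.pyRange 0 n 1).foldl
    (fun (st : Int × Int) i =>
      if PySem.List.pyGetD subkey i "" == "N/A" && !(PySem.List.pyGetD superkey i "" == "N/A") then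
        (st.1 - 1, st.2)
      else if PySem.List.pyGetD superkey i "" == "N/A" && !(PySem.List.pyGetD subkey i "" == "N/A") then
        (st.1, st.2 - 1)
      else st)
    (n, n)
  st.1 != st.2
-- st = (sub_count, super_count)

-- ===== PORT B =====
-- literal transliteration of B: subkey.count("N/A") vs an indexed N/A tally over superkey
def different_match_weight_alt (subkey : List String) (superkey : List String) : Bool :=
  let naSub : Int := PySem.List.count subkey "N/A"
  let naSuper : Int := (PySem.List.pyRange 0 (subkey.length : Int) 1).foldl
    (fun acc i => if PySem.List.pyGetD superkey i "" == "N/A" then acc + 1 else acc) 0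
  naSub != naSuper

-- ===== PRECONDITION & SPEC =====
-- Pre_ excludes exactly the inputs where A raises IndexError: superkey shorter than subkey (B raises there too).
def Pre_different_match_weight (subkey : List String) (superkey : List String) : Prop :=
  subkey.length ≤ superkey.length
instance (subkey : List String) (superkey : List String) : Decidable (Pre_different_match_weight subkey superkey) := by unfold Pre_different_match_weight; infer_instance
def pvWitness_different_match_weight : List String × List String := (["N/A", "x"], ["N/A", "N/A"])
def Spec_different_match_weight (subkey : List String) (superkey : List String) (out : Bool) : Prop := out = different_match_weight_alt subkey superkey
instance (subkey : List String) (superkey : List String) (out : Bool) : Decidable (Spec_different_match_weight subkey superkey out) := by unfold Spec_different_match_weight; infer_instance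

-- ===== CLAIM (what is proved, stated in full; the proofs are below) =====
def Claim_equal_different_match_weight : Prop := ∀ (subkey : List String) (superkey : List String), Dom_different_match_weight subkey superkey → Pre_different_match_weight subkey superkey → Spec_different_match_weight subkey superkey (different_match_weight subkey superkey)

-- ===== LEMMAS AND PROOFS =====

-- Joint invariant of the three folds over range(n): A's two counters diverge exactly by
-- (sub-side N/A tally) − (super-side N/A tally); positions where both are "N/A" cancel.
theorem pvTriInv (subkey superkey : List String) (n : Nat) :
    ∀ (x y a t : Int),
      let r := (PySem.List.pyRange 0 (n : Int) 1).foldl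
        (fun (st : Int × Int) i =>
          if PySem.List.pyGetD subkey i "" == "N/A" && !(PySem.List.pyGetD superkey i "" == "N/A") then
            (st.1 - 1, st.2)
          else if PySem.List.pyGetD superkey i "" == "N/A" && !(PySem.List.pyGetD subkey i "" == "N/A") then
            (st.1, st.2 - 1)
          else st) (x, y)
      let s := (PySem.List.pyRange 0 (n : Int) 1).foldl
        (fun acc i => if PySem.List.pyGetD superkey i "" == "N/A" then acc + 1 else acc) a
      let u := (PySem.List.pyRange 0 (n : Int) 1).foldl
        (fun acc i => if PySem.List.pyGetD subkey i "" == "N/A" then acc + 1 else acc) t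
      r.1 - r.2 = (x - y) - (u - t) + (s - a) := by
  induction n with
  | zero =>
      intro x y a t
      simp [PySem.List.pyRange_one_eq_nil]
  | succ m ih =>
      intro x y a t
      have hcast : ((m + 1 : Nat) : Int) = (m : Int) + 1 := by push_cast; ring
      rw [hcast, PySem.List.pyRange_one_succ_right (by positivity)]
      simp only [List.foldl_append, List.foldl_cons, List.foldl_nil]
      have h := ih x y a t
      simp only at h
      by_cases h1 : subkey[m]?.getD "" = "N/A" <;>
        by_cases h2 : superkey[m]?.getD "" = "N/A" <;>
        simp [h1, h2] at h ⊢ <;> omega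

-- subkey.count "N/A" equals the indexed tally over all of subkey
theorem pvCountEq (subkey : List String) (t : Int) :
    (PySem.List.pyRange 0 (subkey.length : Int) 1).foldl
      (fun acc i => if PySem.List.pyGetD subkey i "" == "N/A" then acc + 1 else acc) t
      = t + (PySem.List.count subkey "N/A" : Int) := by
  rw [PySem.List.foldl_pyRange_zero_pyGetD' subkey ""
        (fun acc v => if v == "N/A" then acc + 1 else acc) t]
  rw [PySem.List.foldl_beq_add_one, PySem.List.count_eq]

theorem different_match_weight_spec_aux (subkey superkey : List String) :
    different_match_weight subkey superkey = different_match_weight_alt subkey superkey := by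
  unfold different_match_weight different_match_weight_alt
  have h := pvTriInv subkey superkey subkey.length (subkey.length : Int) (subkey.length : Int) 0 0
  simp only at h
  have hc := pvCountEq subkey 0
  simp only
  rw [Bool.eq_iff_iff]
  simp only [bne_iff_ne, ne_eq]
  omega

-- ===== VERDICT (by name: the statement is the Claim_ definition above) =====
theorem different_match_weight_spec : Claim_equal_different_match_weight := by
  intro subkey superkey _ _
  exact different_match_weight_spec_aux subkey superkey
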